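-- pv_equiv track=rewrite | github.com/BXuan694/utils | functions.py | classifyByLabel
-- ===== SOURCE A (Python) =====
-- def classifyByLabel(lBoxes):
--     """
--     lBoxes: list of list of 5-int box, all anno boxes.
--     return: dict, k: int, label,
--                   v: list of list of 4-int box, all boxes.
--     """
--     d = dict()
--     for boxes in lBoxes:
--         for box in boxes:
--             if box[4] not in d:
--                 d[box[4]] = list()
--             d[box[4]].append(box[0:4])
--     return d
-- ===== SOURCE B (Python) =====
-- def classifyByLabel(lBoxes):
--     """
--     lBoxes: list of list of 5-int box, all anno boxes.
--     return: dict, k: int, label,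
--                   v: list of list of 4-int box, all boxes.
--     """
--     flat = [box for boxes in lBoxes for box in boxes]
--     labels = list(dict.fromkeys(box[4] for box in flat))
--     return {l: [box[0:4] for box in flat if box[4] == l] for l in labels}
-- ===== Notes on version B (the rewrite author's own statement) =====
-- stated objective: alternative
-- what changed: B replaces A's single-pass dict mutation (create-empty-then-append per box) by a label-major two-pass build: flatten the boxes, dedup the labels in first-occurrence order, then build each group with one filter per label.
import Mathlib
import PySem

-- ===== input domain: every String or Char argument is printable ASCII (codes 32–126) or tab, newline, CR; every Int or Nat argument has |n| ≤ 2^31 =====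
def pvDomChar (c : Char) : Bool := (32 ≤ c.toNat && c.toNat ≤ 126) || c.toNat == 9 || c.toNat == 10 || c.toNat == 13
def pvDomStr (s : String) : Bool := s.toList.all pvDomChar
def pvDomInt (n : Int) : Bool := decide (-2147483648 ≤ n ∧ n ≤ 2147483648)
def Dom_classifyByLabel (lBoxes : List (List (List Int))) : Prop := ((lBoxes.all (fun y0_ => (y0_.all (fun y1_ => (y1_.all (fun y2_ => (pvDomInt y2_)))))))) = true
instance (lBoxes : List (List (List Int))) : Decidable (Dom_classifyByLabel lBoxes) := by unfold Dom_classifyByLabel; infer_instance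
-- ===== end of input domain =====

-- B replaces A's one-pass dict-mutation grouping by a two-pass label-major build
-- (dedup the labels, then one filter per label); alternative decomposition, not faster.

-- ===== PORT A =====
-- A's `if box[4] not in d: d[box[4]] = []` followed by `d[box[4]].append(box[0:4])`
-- is exactly `d[box[4]] = d.get(box[4], []) + [box[0:4]]`, i.e. PySem.Dict.modify.
-- box[4] is PySem.List.pyGetD (total form) — exact under Pre_ (every box has length ≥ 5).
def classifyByLabel (lBoxes : List (List (List Int))) : List (Int × List (List Int)) :=
  (lBoxes.foldl (fun d boxes =>
      boxes.foldl (fun d box =>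
        PySem.Dict.modify d (PySem.List.pyGetD box 4 0) []
          (fun v => v ++ [PySem.List.slice box (some 0) (some 4)])) d)
    PySem.Dict.empty).items

-- ===== PORT B =====
def classifyByLabel_alt (lBoxes : List (List (List Int))) : List (Int × List (List Int)) :=
  let flat := lBoxes.flatMap id
  let labels := PySem.List.dedup (flat.map (fun box => PySem.List.pyGetD box 4 0))
  labels.map (fun l =>
    (l, (flat.filter (fun box => PySem.List.pyGetD box 4 0 == l)).map
          (fun box => PySem.List.slice box (some 0) (some 4))))

-- ===== PRECONDITION & SPEC =====
-- Pre_ excludes exactly the inputs where Python A raises IndexError on box[4]: some box shorter than 5.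
def Pre_classifyByLabel (lBoxes : List (List (List Int))) : Prop :=
  ∀ boxes ∈ lBoxes, ∀ box ∈ boxes, 5 ≤ box.length
instance (lBoxes : List (List (List Int))) : Decidable (Pre_classifyByLabel lBoxes) := by
  unfold Pre_classifyByLabel; infer_instance
def pvWitness_classifyByLabel : List (List (List Int)) := [[[1, 2, 3, 4, 7]], [[0, 0, 1, 1, 7], [5, 6, 7, 8, 2]]]

def Spec_classifyByLabel (lBoxes : List (List (List Int))) (out : List (Int × List (List Int))) : Prop := out = classifyByLabel_alt lBoxes
instance (lBoxes : List (List (List Int))) (out : List (Int × List (List Int))) : Decidable (Spec_classifyByLabel lBoxes out) := by unfold Spec_classifyByLabel; infer_instance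

-- ===== CLAIM (what is proved, stated in full; the proofs are below) =====
def Claim_equal_classifyByLabel : Prop := ∀ (lBoxes : List (List (List Int))), Dom_classifyByLabel lBoxes → Pre_classifyByLabel lBoxes → Spec_classifyByLabel lBoxes (classifyByLabel lBoxes)

-- ===== LEMMAS AND PROOFS =====

-- ===== VERDICT (by name: the statement is the Claim_ definition above) =====
theorem classifyByLabel_group (flat : List (List Int)) (l : Int) :
    (flat.foldl (fun d box => PySem.Dict.modify d (PySem.List.pyGetD box 4 0) []
        (fun v => v ++ [PySem.List.slice box (some 0) (some 4)])) PySem.Dict.empty).getD l []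
    = (flat.filter (fun box => PySem.List.pyGetD box 4 0 == l)).map
        (fun box => PySem.List.slice box (some 0) (some 4)) := by
  have h := PySem.Dict.getD_foldl_modify_append
      (flat.map (fun box => (PySem.List.pyGetD box 4 0, PySem.List.slice box (some 0) (some 4))))
      PySem.Dict.empty l
  rw [List.foldl_map] at h
  simpa [List.filter_map, Function.comp_def] using h

theorem classifyByLabel_spec : Claim_equal_classifyByLabel := by
  intro lBoxes _ _
  unfold Spec_classifyByLabel classifyByLabel classifyByLabel_alt
  dsimp only
  rw [← List.flatten_eq_flatMap, List.foldl_flatten.symm]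
  set flat := lBoxes.flatten with hflat
  have hnd : (flat.foldl (fun d box =>
      PySem.Dict.modify d (PySem.List.pyGetD box 4 0) []
        (fun v => v ++ [PySem.List.slice box (some 0) (some 4)])) PySem.Dict.empty).keys.Nodup :=
    PySem.Dict.nodup_keys_foldl_modify_key flat (fun box => PySem.List.pyGetD box 4 0) []
      (fun _ box v => v ++ [PySem.List.slice box (some 0) (some 4)])
      PySem.Dict.empty (by simp [PySem.Dict.keys_empty])
  rw [PySem.Dict.items_eq_map_keys _ hnd []]
  rw [PySem.Dict.keys_foldl_modify_key flat (fun box => PySem.List.pyGetD box 4 0) []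
      (fun _ box v => v ++ [PySem.List.slice box (some 0) (some 4)])]
  rw [PySem.List.dedup_eq_ofList,
      ← PySem.Set.update_nil_left (flat.map (fun box => PySem.List.pyGetD box 4 0))]
  simp only [PySem.Dict.keys_empty]
  apply List.map_congr_left
  intro l _
  rw [classifyByLabel_group flat l]
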